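-- pv_equiv track=rewrite | github.com/Lupus1988/Phoniebox | app.py | normalize_encoder_modules
-- ===== SOURCE A (Python) =====
-- ENCODER_SLOT_OPTIONS = [
--     {"id": "encoder-1", "label": "Modul 1"},
--     {"id": "encoder-2", "label": "Modul 2"},
-- ]
--
-- ENCODER_SLOT_IDS = {option["id"] for option in ENCODER_SLOT_OPTIONS}
--
-- def normalize_encoder_slot(value):
--     normalized = (value or "").strip()
--     return normalized if normalized in ENCODER_SLOT_IDS else ""
--
-- def normalize_encoder_modules(modules):
--     provided = {}
--     for module in modules or []:
--         slot_id = normalize_encoder_slot((module or {}).get("id"))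
--         if not slot_id:
--             continue
--         provided[slot_id] = {
--             "id": slot_id,
--             "label": next((option["label"] for option in ENCODER_SLOT_OPTIONS if option["id"] == slot_id), slot_id),
--             "clk_pin": ((module or {}).get("clk_pin") or "").strip(),
--             "dt_pin": ((module or {}).get("dt_pin") or "").strip(),
--             "sw_pin": ((module or {}).get("sw_pin") or "").strip(),
--         }
--     normalized = []
--     for option in ENCODER_SLOT_OPTIONS:
--         normalized.append(provided.get(option["id"], {"id": option["id"], "label": option["label"], "clk_pin": "", "dt_pin": "", "sw_pin": ""}))
--     return normalized
-- ===== SOURCE B (Python) =====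
-- ENCODER_SLOT_OPTIONS = [
--     {"id": "encoder-1", "label": "Modul 1"},
--     {"id": "encoder-2", "label": "Modul 2"},
-- ]
--
-- def normalize_encoder_modules(modules):
--     mods = list(modules or [])
--     normalized = []
--     for option in ENCODER_SLOT_OPTIONS:
--         match = None
--         for module in mods:
--             if ((module or {}).get("id") or "").strip() == option["id"]:
--                 match = module
--         if match is None:
--             normalized.append({"id": option["id"], "label": option["label"],
--                                "clk_pin": "", "dt_pin": "", "sw_pin": ""})
--         else:
--             normalized.append({"id": option["id"], "label": option["label"],
--                                "clk_pin": ((match or {}).get("clk_pin") or "").strip(),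
--                                "dt_pin": ((match or {}).get("dt_pin") or "").strip(),
--                                "sw_pin": ((match or {}).get("sw_pin") or "").strip()})
--     return normalized
-- ===== Notes on version B (the rewrite author's own statement) =====
-- stated objective: simpler
-- what changed: Drops the intermediate 'provided' dict and the guard/continue indexing pass: B iterates over the fixed slot options and scans the module list for the last module whose stripped id equals the slot id, emitting each entry directly.
import Mathlib
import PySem

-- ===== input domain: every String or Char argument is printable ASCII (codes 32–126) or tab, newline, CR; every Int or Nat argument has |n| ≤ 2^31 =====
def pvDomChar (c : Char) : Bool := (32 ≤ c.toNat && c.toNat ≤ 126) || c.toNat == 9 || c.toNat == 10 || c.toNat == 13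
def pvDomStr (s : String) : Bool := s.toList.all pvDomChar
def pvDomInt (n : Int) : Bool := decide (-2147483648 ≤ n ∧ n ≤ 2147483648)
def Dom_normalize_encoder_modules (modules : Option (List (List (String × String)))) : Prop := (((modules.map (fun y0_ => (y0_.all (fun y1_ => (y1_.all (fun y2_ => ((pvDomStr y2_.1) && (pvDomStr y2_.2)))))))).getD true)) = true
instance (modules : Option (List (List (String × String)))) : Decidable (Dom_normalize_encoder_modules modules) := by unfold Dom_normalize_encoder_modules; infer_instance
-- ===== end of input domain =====

-- B drops A's intermediate 'provided' dict: per fixed slot it scans for the last matching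
-- module and emits the entry directly (simpler decomposition; return value only, no mutation).

-- shared module-level context (same constants appear in both Python files)
def encoderSlotOptions : List (String × String) :=
  [("encoder-1", "Modul 1"), ("encoder-2", "Modul 2")]

def encoderSlotIds : PySem.Set String :=
  PySem.Set.ofList (encoderSlotOptions.map (·.1))

-- ((module or {}).get(k) or "").strip()  — identical expression in both Pythons
def pinOf (m : List (String × String)) (k : String) : String :=
  PySem.Str.strip (((PySem.Dict.mk m).get? k).getD "")

-- the empty default entry literal, written identically in both Pythons
def defEntry (o : String × String) : List (String × String) :=
  [("id", o.1), ("label", o.2), ("clk_pin", ""), ("dt_pin", ""), ("sw_pin", "")]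

-- ===== PORT A =====
def normalize_encoder_slot (value : Option String) : String :=
  let normalized := PySem.Str.strip (value.getD "")
  if PySem.Set.contains encoderSlotIds normalized then normalized else ""

def aEntry (slot_id : String) (m : List (String × String)) : List (String × String) :=
  [("id", slot_id),
   ("label", ((encoderSlotOptions.find? (fun o => o.1 == slot_id)).map (·.2)).getD slot_id),
   ("clk_pin", pinOf m "clk_pin"),
   ("dt_pin", pinOf m "dt_pin"),
   ("sw_pin", pinOf m "sw_pin")]

def aStep (d : PySem.Dict String (List (String × String))) (m : List (String × String)) :
    PySem.Dict String (List (String × String)) :=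
  let slot_id := normalize_encoder_slot ((PySem.Dict.mk m).get? "id")
  if slot_id = "" then d else d.insert slot_id (aEntry slot_id m)

def normalize_encoder_modules (modules : Option (List (List (String × String)))) :
    List (List (String × String)) :=
  let provided := (modules.getD []).foldl aStep PySem.Dict.empty
  encoderSlotOptions.foldl (fun acc o => acc ++ [provided.getD o.1 (defEntry o)]) []

-- ===== PORT B =====
def bStep (o : String × String) (mt : Option (List (String × String)))
    (m : List (String × String)) : Option (List (String × String)) :=
  if PySem.Str.strip (((PySem.Dict.mk m).get? "id").getD "") == o.1 then some m else mt

def bEntry (o : String × String) (m : List (String × String)) : List (String × String) :=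
  [("id", o.1), ("label", o.2),
   ("clk_pin", pinOf m "clk_pin"),
   ("dt_pin", pinOf m "dt_pin"),
   ("sw_pin", pinOf m "sw_pin")]

def normalize_encoder_modules_alt (modules : Option (List (List (String × String)))) :
    List (List (String × String)) :=
  let mods := modules.getD []
  encoderSlotOptions.foldl
    (fun acc o =>
      acc ++ [match mods.foldl (bStep o) none with
              | none => defEntry o
              | some m => bEntry o m]) []

-- ===== PRECONDITION & SPEC =====
def Spec_normalize_encoder_modules (modules : Option (List (List (String × String)))) (out : List (List (String × String))) : Prop := out = normalize_encoder_modules_alt modules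
instance (modules : Option (List (List (String × String)))) (out : List (List (String × String))) : Decidable (Spec_normalize_encoder_modules modules out) := by unfold Spec_normalize_encoder_modules; infer_instance

-- ===== CLAIM (what is proved, stated in full; the proofs are below) =====
def Claim_equal_normalize_encoder_modules : Prop := ∀ (modules : Option (List (List (String × String)))), Dom_normalize_encoder_modules modules → Spec_normalize_encoder_modules modules (normalize_encoder_modules modules)

-- ===== LEMMAS AND PROOFS =====

-- what B's scan result means for one slot
def outOf (o : String × String) : Option (List (String × String)) → List (String × String)
  | none => defEntry o
  | some m => bEntry o m

-- invariant: A's dict at key o.1 tracks B's last-match scan for slot o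
theorem loop_inv (o : String × String)
    (hmem : PySem.Set.contains encoderSlotIds o.1 = true)
    (hne : o.1 ≠ "")
    (hlabel : ((encoderSlotOptions.find? (fun p => p.1 == o.1)).map (·.2)).getD o.1 = o.2) :
    ∀ (mods : List (List (String × String)))
      (d : PySem.Dict String (List (String × String)))
      (acc : Option (List (String × String))),
      d.getD o.1 (defEntry o) = outOf o acc →
      (mods.foldl aStep d).getD o.1 (defEntry o) = outOf o (mods.foldl (bStep o) acc) := by
  intro mods
  induction mods with
  | nil => intro d acc h; simpa using h
  | cons m t ih =>
    intro d acc h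
    simp only [List.foldl_cons]
    apply ih
    by_cases hs : PySem.Str.strip (((PySem.Dict.mk m).get? "id").getD "") = o.1
    · -- this module matches slot o: A inserts at o.1, B records m
      have hmem' : o.1 ∈ encoderSlotIds := (PySem.Set.contains_iff _ _).mp hmem
      have hsid : normalize_encoder_slot ((PySem.Dict.mk m).get? "id") = o.1 := by
        simp [normalize_encoder_slot, hs, hmem']
      simp only [aStep, bStep, hsid, hs, beq_self_eq_true, if_true, if_neg hne]
      rw [PySem.Dict.getD_insert_self]
      simp [outOf, aEntry, bEntry, hlabel]
    · -- no match for slot o: A's key o.1 and B's acc are both unchanged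
      have hb : bStep o acc m = acc := by simp [bStep, hs]
      rw [hb]
      have hkey : normalize_encoder_slot ((PySem.Dict.mk m).get? "id") ≠ o.1 := by
        simp only [normalize_encoder_slot]
        split
        · exact hs
        · exact Ne.symm hne
      simp only [aStep]
      by_cases hz : normalize_encoder_slot ((PySem.Dict.mk m).get? "id") = ""
      · simpa [hz] using h
      · rw [if_neg hz, PySem.Dict.getD_insert_of_ne _ _ _ (Ne.symm hkey)]
        exact h

-- ===== VERDICT (by name: the statement is the Claim_ definition above) =====
theorem normalize_encoder_modules_spec : Claim_equal_normalize_encoder_modules := by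
  intro modules _
  unfold Spec_normalize_encoder_modules
  unfold normalize_encoder_modules normalize_encoder_modules_alt
  simp only [encoderSlotOptions, List.foldl_cons, List.foldl_nil, List.nil_append]
  have h1 := loop_inv ("encoder-1", "Modul 1") (by decide) (by decide) (by decide)
    (modules.getD []) PySem.Dict.empty none (by simp [outOf, PySem.Dict.getD_empty])
  have h2 := loop_inv ("encoder-2", "Modul 2") (by decide) (by decide) (by decide)
    (modules.getD []) PySem.Dict.empty none (by simp [outOf, PySem.Dict.getD_empty])
  rw [h1, h2]
  cases hm1 : (modules.getD []).foldl (bStep ("encoder-1", "Modul 1")) none <;>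
  cases hm2 : (modules.getD []).foldl (bStep ("encoder-2", "Modul 2")) none <;>
    simp [outOf]
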